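-- pv_equiv track=rewrite | github.com/Itamarelmakia/waterisrael | src/water_validation/utils.py | longest_true_run
-- ===== SOURCE A (Python) =====
-- from typing import Any, List, Optional, Tuple
--
-- def longest_true_run(mask: List[bool]) -> Tuple[int, int]:
--     best = (-1, -1)
--     best_len = 0
--     start = None
--
--     for i, v in enumerate(mask):
--         if v and start is None:
--             start = i
--         if (not v or i == len(mask) - 1) and start is not None:
--             end = i if v and i == len(mask) - 1 else i - 1
--             run_len = end - start + 1
--             if run_len > best_len:
--                 best_len = run_len
--                 best = (start, end)
--             start = None
--
--     return best
-- ===== SOURCE B (Python) =====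
-- from itertools import groupby
-- from typing import List, Tuple
--
-- def longest_true_run(mask: List[bool]) -> Tuple[int, int]:
--     best = (-1, -1)
--     best_len = 0
--     off = 0
--     for key, grp in groupby(mask):
--         n = sum(1 for _ in grp)
--         if key and n > best_len:
--             best, best_len = (off, off + n - 1), n
--         off += n
--     return best
-- ===== Notes on version B (the rewrite author's own statement) =====
-- stated objective: simpler
-- what changed: Replaces the start/end sentinel state machine with an itertools.groupby pass over maximal equal runs, keeping only a running offset and the best (start,end); the last-element special case disappears.
import Mathlib
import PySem

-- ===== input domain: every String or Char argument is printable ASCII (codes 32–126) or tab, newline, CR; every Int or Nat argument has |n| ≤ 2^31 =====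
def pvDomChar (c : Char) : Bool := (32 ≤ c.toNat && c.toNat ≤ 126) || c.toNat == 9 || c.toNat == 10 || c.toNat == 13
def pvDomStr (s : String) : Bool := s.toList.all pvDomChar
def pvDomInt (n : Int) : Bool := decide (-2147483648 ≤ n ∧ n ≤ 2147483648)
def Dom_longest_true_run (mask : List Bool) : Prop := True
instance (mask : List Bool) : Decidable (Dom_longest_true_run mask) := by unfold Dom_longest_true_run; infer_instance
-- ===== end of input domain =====

-- B replaces A's start/end sentinel state machine with an itertools.groupby pass over
-- maximal equal runs (same O(n) cost, simpler decomposition); return value only.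

-- ===== PORT A =====
-- the 'for i, v in enumerate(mask)' loop, state (best, best_len, start)
def pvALoop (n : Int) : List Bool → Int → (Int × Int) → Int → Option Int → Int × Int
  | [], _, best, _, _ => best
  | v :: rest, i, best, bestLen, start =>
    let start1 := if v ∧ start = none then some i else start
    if ((v = false) ∨ i = n - 1) ∧ start1 ≠ none then
      let e := if v ∧ i = n - 1 then i else i - 1
      let s := start1.getD 0
      let runLen := e - s + 1
      if runLen > bestLen then pvALoop n rest (i + 1) (s, e) runLen none
      else pvALoop n rest (i + 1) best bestLen none
    else pvALoop n rest (i + 1) best bestLen start1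

def longest_true_run (mask : List Bool) : Int × Int :=
  pvALoop (mask.length : Int) mask 0 (-1, -1) 0 none

-- ===== PORT B =====
-- the groupby loop: consume one maximal run of equal values per step
def pvBGo : List Bool → Int → (Int × Int) → Int → Int × Int
  | [], _, best, _ => best
  | x :: xs, off, best, bestLen =>
    let len : Int := 1 + ((xs.takeWhile (· == x)).length : Int)
    let rest := xs.dropWhile (· == x)
    if x ∧ len > bestLen then pvBGo rest (off + len) (off, off + len - 1) len
    else pvBGo rest (off + len) best bestLen
  termination_by xs => xs.length
  decreasing_by
    all_goals
      exact Nat.lt_succ_of_le (List.length_dropWhile_le _ _)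

def longest_true_run_alt (mask : List Bool) : Int × Int :=
  pvBGo mask 0 (-1, -1) 0

-- ===== PRECONDITION & SPEC =====
def Spec_longest_true_run (mask : List Bool) (out : Int × Int) : Prop := out = longest_true_run_alt mask
instance (mask : List Bool) (out : Int × Int) : Decidable (Spec_longest_true_run mask out) := by unfold Spec_longest_true_run; infer_instance

-- ===== CLAIM (what is proved, stated in full; the proofs are below) =====
def Claim_equal_longest_true_run : Prop := ∀ (mask : List Bool), Dom_longest_true_run mask → Spec_longest_true_run mask (longest_true_run mask)

-- ===== LEMMAS AND PROOFS =====

-- skipping one leading false in B only advances the offset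
lemma pvBGo_false (rs : List Bool) (off : Int) (b : Int × Int) (bl : Int) :
    pvBGo (false :: rs) off b bl = pvBGo rs (off + 1) b bl := by
  match rs with
  | [] => simp [pvBGo]
  | true :: rs' => simp [pvBGo]
  | false :: rs' =>
    simp only [pvBGo, List.takeWhile, List.dropWhile]
    norm_num
    ring_nf

-- one unfolding of B's grouped loop on a cons cell
lemma pvBGo_cons (x : Bool) (xs : List Bool) (off bl : Int) (b : Int × Int) :
    pvBGo (x :: xs) off b bl =
      if x ∧ (1 + ((xs.takeWhile (· == x)).length : Int)) > bl then
        pvBGo (xs.dropWhile (· == x)) (off + (1 + ((xs.takeWhile (· == x)).length : Int)))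
          (off, off + (1 + ((xs.takeWhile (· == x)).length : Int)) - 1)
          (1 + ((xs.takeWhile (· == x)).length : Int))
      else pvBGo (xs.dropWhile (· == x)) (off + (1 + ((xs.takeWhile (· == x)).length : Int))) b bl := by
  rw [pvBGo]

-- a nonempty dropWhile (== true) starts with false
lemma pv_drop_head (xs : List Bool) (h : xs.dropWhile (· == true) ≠ []) :
    ∃ t, xs.dropWhile (· == true) = false :: t := by
  induction xs with
  | nil => exact absurd rfl h
  | cons v rest ih =>
    cases v with
    | true => simpa [List.dropWhile] using ih (by simpa [List.dropWhile] using h)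
    | false => exact ⟨rest, by simp [List.dropWhile]⟩

-- closed form for A's loop while inside a run (start = some s)
lemma pvALoop_run (xs : List Bool) : ∀ (n i s : Int) (b : Int × Int) (bl : Int),
    n = i + (xs.length : Int) → xs ≠ [] →
    pvALoop n xs i b bl (some s) =
      (if (xs.takeWhile (· == true)).length = xs.length then
         (if i + ((xs.takeWhile (· == true)).length : Int) - s > bl
          then (s, i + ((xs.takeWhile (· == true)).length : Int) - 1) else b)
       else
         pvALoop n ((xs.dropWhile (· == true)).tail)
           (i + ((xs.takeWhile (· == true)).length : Int) + 1)
           (if i + ((xs.takeWhile (· == true)).length : Int) - s > bl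
            then (s, i + ((xs.takeWhile (· == true)).length : Int) - 1) else b)
           (if i + ((xs.takeWhile (· == true)).length : Int) - s > bl
            then i + ((xs.takeWhile (· == true)).length : Int) - s else bl) none) := by
  induction xs with
  | nil => intro n i s b bl _ h; exact absurd rfl h
  | cons v rest ih =>
    intro n i s b bl hn _
    cases v with
    | false =>
      simp only [List.takeWhile_cons, List.dropWhile_cons]
      simp only [pvALoop]
      norm_num
      ring_nf
      simp only [reduceCtorEq, if_false]
      split_ifs <;> first | rfl | (exfalso; omega)
    | true =>
      cases rest with
      | nil =>
        simp only [List.takeWhile_cons, List.dropWhile_cons, List.length] at *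
        have h1 : i = n - 1 := by omega
        simp only [pvALoop]
        norm_num [h1]
        ring_nf
        simp only [reduceCtorEq, if_false, Option.getD_some]
        split_ifs <;> first | rfl | (exfalso; omega)
      | cons r rs =>
        have hne : r :: rs ≠ ([] : List Bool) := by simp
        have hn' : n = (i + 1) + ((r :: rs).length : Int) := by
          simp only [List.length_cons] at hn ⊢; push_cast at hn ⊢; omega
        have step : pvALoop n (true :: r :: rs) i b bl (some s)
            = pvALoop n (r :: rs) (i + 1) b bl (some s) := by
          have hne2 : ¬ (i = n - 1) := by
            simp only [List.length_cons] at hn; push_cast at hn; omega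
          simp [pvALoop, hne2]
        rw [step, ih n (i + 1) s b bl hn' hne]
        have htw : List.takeWhile (fun x => x == true) (true :: r :: rs)
            = true :: List.takeWhile (fun x => x == true) (r :: rs) := by
          simp
        have hdw : List.dropWhile (fun x => x == true) (true :: r :: rs)
            = List.dropWhile (fun x => x == true) (r :: rs) := by
          simp
        simp only [htw, hdw, List.length_cons]
        push_cast
        ring_nf

-- main invariant: A's loop with start = None agrees with B's grouped loop
lemma pv_main : ∀ (m : Nat) (xs : List Bool), xs.length = m →
    ∀ (i : Int) (b : Int × Int) (bl : Int),
      pvALoop (i + (m : Int)) xs i b bl none = pvBGo xs i b bl := by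
  intro m
  induction m using Nat.strong_induction_on with
  | _ m ih =>
    intro xs hlen i b bl
    match xs with
    | [] =>
      subst hlen; simp [pvALoop, pvBGo]
    | false :: rest =>
      have hr : rest.length < m := by simp at hlen; omega
      have step : pvALoop (i + (m : Int)) (false :: rest) i b bl none
          = pvALoop (i + (m : Int)) rest (i + 1) b bl none := by
        simp [pvALoop]
      have hn : i + (m : Int) = (i + 1) + (rest.length : Int) := by
        simp only [List.length_cons] at hlen; omega
      rw [step, hn, ih rest.length hr rest rfl (i + 1) b bl, ← pvBGo_false]
    | true :: rest =>
      have hsome : pvALoop (i + (m : Int)) (true :: rest) i b bl none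
          = pvALoop (i + (m : Int)) (true :: rest) i b bl (some i) := by
        simp [pvALoop]
      rw [hsome, pvALoop_run (true :: rest) (i + (m : Int)) i i b bl
            (by simp only [List.length_cons] at hlen ⊢; push_cast; omega) (by simp)]
      have htw : List.takeWhile (fun x => x == true) (true :: rest)
          = true :: List.takeWhile (fun x => x == true) rest := by
        simp
      have hdw : List.dropWhile (fun x => x == true) (true :: rest)
          = List.dropWhile (fun x => x == true) rest := by
        simp
      have hsum : (List.takeWhile (fun x => x == true) rest).length
          + (List.dropWhile (fun x => x == true) rest).length = rest.length := by
        have h := congrArg List.length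
          (List.takeWhile_append_dropWhile (p := fun x => x == true) (l := rest))
        simp only [List.length_append] at h
        exact h
      simp only [htw, hdw, List.length_cons]
      by_cases hk : (List.takeWhile (fun x => x == true) rest).length = rest.length
      · have hdnil : List.dropWhile (fun x => x == true) rest = [] :=
          List.eq_nil_of_length_eq_zero (by omega)
        rw [if_pos (by omega)]
        rw [pvBGo_cons, hdnil]
        simp only [pvBGo, true_and]
        push_cast
        ring_nf
      · rw [if_neg (by simpa using hk)]
        have hne : List.dropWhile (fun x => x == true) rest ≠ [] := by
          intro h0
          rw [h0] at hsum
          simp only [List.length_nil, Nat.add_zero] at hsum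
          exact hk hsum
        obtain ⟨t, ht⟩ := pv_drop_head rest hne
        have hlt : (List.dropWhile (fun x => x == true) rest).length = t.length + 1 := by
          rw [ht]; simp
        have htm : t.length < m := by
          simp only [List.length_cons] at hlen; omega
        have hn2 : i + (m : Int)
            = (i + (((List.takeWhile (fun x => x == true) rest).length + 1 : Nat) : Int) + 1)
              + (t.length : Int) := by
          simp only [List.length_cons] at hlen; push_cast; omega
        rw [ht]
        simp only [List.tail_cons]
        rw [hn2, ih t.length htm t rfl]
        rw [pvBGo_cons, ht, pvBGo_false, pvBGo_false]
        simp only [true_and]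
        push_cast
        ring_nf
        split_ifs <;> rfl

-- ===== VERDICT (by name: the statement is the Claim_ definition above) =====
theorem longest_true_run_spec : Claim_equal_longest_true_run := by
  intro mask _
  unfold Spec_longest_true_run longest_true_run longest_true_run_alt
  have := pv_main mask.length mask rfl 0 (-1, -1) 0
  simpa using this
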